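-- pv_equiv track=rewrite | github.com/pypi-data/pypi-mirror-398 | packages/domino-mesoscale/domino_mesoscale-0.1.0.tar.gz/domino_mesoscale-0.1.0/src/domino/represent_and_analyze.py | relabel_communities_sorted
-- ===== SOURCE A (Python) =====
-- from typing import Any, Dict, Iterable, List, Optional, Tuple, Union
--
-- def relabel_communities_sorted(C: Dict[Any, int]) -> Dict[Any, int]:
--     """
--     Relabel community ids to contiguous 0..K-1 in a deterministic manner.
--
--     The mapping is induced by scanning nodes in sorted order and assigning new
--     labels in order of first appearance.
--     """
--     mapping: Dict[int, int] = {}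
--     next_id = 0
--     out: Dict[Any, int] = {}
--     for n in sorted(C.keys()):
--         old = int(C[n])
--         if old not in mapping:
--             mapping[old] = next_id
--             next_id += 1
--         out[n] = mapping[old]
--     return out
-- ===== SOURCE B (Python) =====
-- def relabel_communities_sorted(C):
--     """Rank-by-first-position: one reverse sweep records each label's first
--     occurrence index over the sorted keys (descending iteration lets the
--     smallest index win), the distinct labels sorted by that position give the
--     new ids as ranks."""
--     ks = sorted(C.keys())
--     first = {}
--     for i, n in reversed(list(enumerate(ks))):
--         first[int(C[n])] = i
--     rank = {old: r for r, old in enumerate(sorted(first, key=first.get))}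
--     return {n: rank[int(C[n])] for n in ks}
-- ===== Notes on version B (the rewrite author's own statement) =====
-- stated objective: alternative
-- what changed: A assigns new ids with a running counter and membership test fused into one forward pass; B instead computes each label's first-occurrence position with a single reverse sweep (descending overwrites make the smallest index win) and obtains the new id of a label as its rank when the distinct labels are sorted by that position.
import Mathlib
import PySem

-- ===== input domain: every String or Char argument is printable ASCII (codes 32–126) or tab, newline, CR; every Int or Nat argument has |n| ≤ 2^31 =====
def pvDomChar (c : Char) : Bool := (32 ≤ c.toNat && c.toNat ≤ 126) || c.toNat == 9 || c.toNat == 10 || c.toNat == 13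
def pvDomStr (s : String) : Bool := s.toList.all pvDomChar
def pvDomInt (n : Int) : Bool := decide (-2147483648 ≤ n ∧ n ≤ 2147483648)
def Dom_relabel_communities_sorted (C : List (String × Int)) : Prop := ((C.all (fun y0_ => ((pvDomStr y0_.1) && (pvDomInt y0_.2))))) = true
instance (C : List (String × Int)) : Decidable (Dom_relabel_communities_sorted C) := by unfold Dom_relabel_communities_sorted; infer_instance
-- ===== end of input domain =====

-- B replaces A's fused forward pass (counter + membership test) by a different algorithm:
-- a reverse sweep records each label's first-occurrence index over the sorted keys, and the
-- new id of a label is its rank when the distinct labels are sorted by that index. Objective: alternative.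


-- ===== PORT A =====
-- C is a dict (assoc list, first-match lookup); C[n] with n a key of C always succeeds, ported as getD _ 0; int(C[n]) = C[n] on Int values.
def relabel_communities_sorted (C : List (String × Int)) : List (String × Int) :=
  let ks := PySem.List.sorted (PySem.Set.ofList (C.map Prod.fst)) (fun x => x) false
  let fin := ks.foldl
    (fun (st : PySem.Dict Int Int × Int × PySem.Dict String Int) n =>
      let mapping := st.1
      let next_id := st.2.1
      let out := st.2.2
      let old := (PySem.Dict.mk C).getD n 0
      let mapping' := if mapping.contains old then mapping else mapping.insert old next_id
      let next_id' := if mapping.contains old then next_id else next_id + 1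
      (mapping', next_id', out.insert n (mapping'.getD old 0)))
    (PySem.Dict.empty, 0, PySem.Dict.empty)
  fin.2.2.items

-- ===== PORT B =====
-- reversed(list(enumerate(ks))) is (enumerate ks 0).reverse; first[int(C[n])] = i is an insert fold;
-- sorted(first, key=first.get) sorts the dict's keys by their stored position.
def relabel_communities_sorted_alt (C : List (String × Int)) : List (String × Int) :=
  let ks := PySem.List.sorted (PySem.Set.ofList (C.map Prod.fst)) (fun x => x) false
  let first := (PySem.List.enumerate ks 0).reverse.foldl
      (fun (d : PySem.Dict Int Int) p => d.insert ((PySem.Dict.mk C).getD p.2 0) p.1) PySem.Dict.empty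
  let order := PySem.List.sorted first.keys (fun v => first.getD v 0) false
  let rank := (PySem.List.enumerate order 0).foldl
      (fun (d : PySem.Dict Int Int) p => d.insert p.2 p.1) PySem.Dict.empty
  ks.map (fun n => (n, rank.getD ((PySem.Dict.mk C).getD n 0) 0))

-- ===== PRECONDITION & SPEC =====
def Spec_relabel_communities_sorted (C : List (String × Int)) (out : List (String × Int)) : Prop := out = relabel_communities_sorted_alt C
instance (C : List (String × Int)) (out : List (String × Int)) : Decidable (Spec_relabel_communities_sorted C out) := by unfold Spec_relabel_communities_sorted; infer_instance

-- ===== CLAIM (what is proved, stated in full; the proofs are below) =====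
def Claim_equal_relabel_communities_sorted : Prop := ∀ (C : List (String × Int)), Dom_relabel_communities_sorted C → Spec_relabel_communities_sorted C (relabel_communities_sorted C)

-- ===== LEMMAS AND PROOFS =====
theorem pv_foldl_add_exists (T : List Int) : ∀ (s : List Int),
    ∃ u, List.foldl PySem.Set.add s T = s ++ u := by
  induction T with
  | nil => intro s; exact ⟨[], by simp⟩
  | cons x t ih =>
    intro s
    simp only [List.foldl_cons]
    obtain ⟨u, hu⟩ := ih (PySem.Set.add s x)
    unfold PySem.Set.add at hu ⊢
    by_cases h : PySem.Set.contains s x = true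
    · rw [if_pos h] at hu ⊢; exact ⟨u, hu⟩
    · rw [if_neg h] at hu ⊢; exact ⟨x :: u, by rw [hu]; simp⟩

theorem pv_ofList_append_exists (T S : List Int) :
    ∃ u, PySem.Set.ofList (S ++ T) = PySem.Set.ofList S ++ u := by
  have h : PySem.Set.ofList (S ++ T) = List.foldl PySem.Set.add (PySem.Set.ofList S) T := by
    simp [PySem.Set.ofList, List.foldl_append]
  rw [h]; exact pv_foldl_add_exists T _

theorem pv_idxOf_dedup_append (S T : List Int) (x : Int) (hx : x ∈ PySem.List.dedup S) :
    (PySem.List.dedup (S ++ T)).idxOf x = (PySem.List.dedup S).idxOf x := by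
  obtain ⟨u, hu⟩ := pv_ofList_append_exists T S
  simp only [PySem.List.dedup] at *
  rw [hu]
  exact List.idxOf_append_of_mem hx

theorem pv_ofList_snoc (S : List Int) (x : Int) :
    PySem.Set.ofList (S ++ [x]) = PySem.Set.add (PySem.Set.ofList S) x := by
  simp [PySem.Set.ofList, List.foldl_append]

theorem pv_dedup_append_new (S : List Int) (x : Int) (hx : x ∉ S) :
    PySem.List.dedup (S ++ [x]) = PySem.List.dedup S ++ [x] := by
  have hc : ¬ PySem.Set.contains (PySem.Set.ofList S) x = true := by
    rw [PySem.Set.contains_iff, PySem.Set.mem_ofList]; exact hx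
  simp only [PySem.List.dedup, pv_ofList_snoc]
  unfold PySem.Set.add
  rw [if_neg hc]

theorem pv_dedup_append_old (S : List Int) (x : Int) (hx : x ∈ S) :
    PySem.List.dedup (S ++ [x]) = PySem.List.dedup S := by
  have hc : PySem.Set.contains (PySem.Set.ofList S) x = true := by
    rw [PySem.Set.contains_iff, PySem.Set.mem_ofList]; exact hx
  simp only [PySem.List.dedup, pv_ofList_snoc]
  unfold PySem.Set.add
  rw [if_pos hc]

theorem pv_enumFold_notmem (l : List Int) : ∀ (s : Int) (d : PySem.Dict Int Int) (y : Int), y ∉ l →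
    ((PySem.List.enumerate l s).foldl (fun d p => d.insert p.2 p.1) d).getD y 0 = d.getD y 0 := by
  induction l with
  | nil => intro s d y _; simp [PySem.List.enumerate_nil]
  | cons x t ih =>
    intro s d y hy
    rw [PySem.List.enumerate_cons, List.foldl_cons]
    rw [ih (s+1) _ y (fun h => hy (List.mem_cons_of_mem _ h))]
    have hne : y ≠ x := by intro h; subst h; exact hy (List.mem_cons_self)
    exact PySem.Dict.getD_insert_of_ne d s 0 hne

theorem pv_enumFold_getD (l : List Int) : ∀ (s : Int) (d : PySem.Dict Int Int),
    l.Nodup → ∀ y ∈ l,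
    ((PySem.List.enumerate l s).foldl (fun d p => d.insert p.2 p.1) d).getD y 0
      = s + (l.idxOf y : Int) := by
  induction l with
  | nil => intro s d _ y hy; simp at hy
  | cons x t ih =>
    intro s d hnd y hy
    rw [PySem.List.enumerate_cons, List.foldl_cons]
    rcases List.mem_cons.mp hy with rfl | hyt
    · have hxt : y ∉ t := (List.nodup_cons.mp hnd).1
      rw [pv_enumFold_notmem t (s+1) _ y hxt]
      rw [PySem.Dict.getD_insert_self]
      simp [List.idxOf_cons_self]
    · have hne : y ≠ x := fun h => (List.nodup_cons.mp hnd).1 (h ▸ hyt)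
      rw [ih (s+1) _ (List.nodup_cons.mp hnd).2 y hyt]
      rw [List.idxOf_cons_ne _ (Ne.symm hne)]
      push_cast; ring

theorem pv_A_run (f : String → Int) (ks : List String) :
    ∀ (S : List Int) (M : PySem.Dict Int Int) (out : PySem.Dict String Int),
    ks.Nodup →
    (∀ n ∈ ks, out.contains n = false) →
    (∀ x, M.contains x = decide (x ∈ PySem.List.dedup S)) →
    (∀ x ∈ PySem.List.dedup S, M.getD x 0 = ((PySem.List.dedup S).idxOf x : Int)) →
    (ks.foldl
      (fun (st : PySem.Dict Int Int × Int × PySem.Dict String Int) n =>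
        let mapping := st.1
        let next_id := st.2.1
        let out := st.2.2
        let old := f n
        let mapping' := if mapping.contains old then mapping else mapping.insert old next_id
        let next_id' := if mapping.contains old then next_id else next_id + 1
        (mapping', next_id', out.insert n (mapping'.getD old 0)))
      (M, ((PySem.List.dedup S).length : Int), out)).2.2.items
    = out.items ++ ks.map (fun n => (n, ((PySem.List.dedup (S ++ ks.map f)).idxOf (f n) : Int))) := by
  induction ks with
  | nil => intro S M out _ _ _ _; simp
  | cons n t ih =>
    intro S M out hnd hout hM1 hM2
    have hmemd : f n ∈ PySem.List.dedup S ↔ f n ∈ S := PySem.List.mem_dedup S (f n)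
    have houtn : out.contains n = false := hout n List.mem_cons_self
    have hSfull : S ++ List.map f (n :: t) = (S ++ [f n]) ++ List.map f t := by simp
    by_cases hc : f n ∈ S
    · have hcE : M.contains (f n) = true := by rw [hM1]; simp [hc]
      have hdedup : PySem.List.dedup (S ++ [f n]) = PySem.List.dedup S := pv_dedup_append_old S (f n) hc
      simp only [List.foldl_cons, hcE, if_true]
      have ihx := ih (S ++ [f n]) M (out.insert n (M.getD (f n) 0))
        (List.nodup_cons.mp hnd).2
        (by
          intro m hm
          rw [PySem.Dict.contains_insert]
          have hmn : m ≠ n := fun h => (List.nodup_cons.mp hnd).1 (h ▸ hm)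
          simp [hmn, hout m (List.mem_cons_of_mem _ hm)])
        (by intro x; rw [hdedup]; exact hM1 x)
        (by intro x hx; rw [hdedup] at hx ⊢; exact hM2 x hx)
      rw [hdedup] at ihx
      rw [ihx]
      rw [PySem.Dict.items_insert_of_not_contains _ _ houtn]
      rw [hM2 (f n) (hmemd.mpr hc)]
      have hSfull' : S ++ f n :: List.map f t = (S ++ [f n]) ++ List.map f t := by simp
      have hidx : List.idxOf (f n) (PySem.List.dedup ((S ++ [f n]) ++ List.map f t))
          = List.idxOf (f n) (PySem.List.dedup S) := by
        rw [List.append_assoc]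
        exact pv_idxOf_dedup_append S _ (f n) (hmemd.mpr hc)
      simp only [List.map_cons, hSfull', hidx]
      simp
    · have hcE : M.contains (f n) = false := by rw [hM1]; simp [hc]
      have hdedup : PySem.List.dedup (S ++ [f n]) = PySem.List.dedup S ++ [f n] :=
        pv_dedup_append_new S (f n) hc
      have hnotd : f n ∉ PySem.List.dedup S := fun h => hc (hmemd.mp h)
      simp only [List.foldl_cons, hcE, Bool.false_eq_true, if_false]
      rw [PySem.Dict.getD_insert_self]
      have hlen : ((PySem.List.dedup (S ++ [f n])).length : Int)
          = ((PySem.List.dedup S).length : Int) + 1 := by rw [hdedup]; simp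
      have ihx := ih (S ++ [f n]) (M.insert (f n) ((PySem.List.dedup S).length : Int))
        (out.insert n ((PySem.List.dedup S).length : Int))
        (List.nodup_cons.mp hnd).2
        (by
          intro m hm
          rw [PySem.Dict.contains_insert]
          have hmn : m ≠ n := fun h => (List.nodup_cons.mp hnd).1 (h ▸ hm)
          simp [hmn, hout m (List.mem_cons_of_mem _ hm)])
        (by
          intro x
          rw [PySem.Dict.contains_insert, hdedup, hM1 x]
          by_cases hx : x = f n <;> simp [hx]
          )
        (by
          intro x hx
          rw [hdedup] at hx ⊢
          by_cases hxn : x = f n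
          · subst hxn
            rw [PySem.Dict.getD_insert_self, List.idxOf_append, if_neg hnotd]
            simp
          · rw [PySem.Dict.getD_insert_of_ne M _ _ hxn]
            have hxS : x ∈ PySem.List.dedup S := by
              rcases List.mem_append.mp hx with h | h
              · exact h
              · simp at h; exact absurd h hxn
            rw [hM2 x hxS, List.idxOf_append, if_pos hxS])
      rw [hlen] at ihx
      rw [ihx]
      rw [PySem.Dict.items_insert_of_not_contains _ _ houtn]
      have hSfull' : S ++ f n :: List.map f t = (S ++ [f n]) ++ List.map f t := by simp
      have hidx : List.idxOf (f n) (PySem.List.dedup ((S ++ [f n]) ++ List.map f t))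
          = (PySem.List.dedup S).length := by
        have h2 := pv_idxOf_dedup_append (S ++ [f n]) (List.map f t) (f n)
          (by rw [hdedup]; simp)
        rw [h2, hdedup, List.idxOf_append, if_neg hnotd]
        simp
      simp only [List.map_cons, hSfull', hidx]
      simp

-- helper names for the proofs (the structure of the ports themselves is above)
def pvKs (C : List (String × Int)) : List String :=
  PySem.List.sorted (PySem.Set.ofList (C.map Prod.fst)) (fun x => x) false
def pvF (C : List (String × Int)) : String → Int := fun n => (PySem.Dict.mk C).getD n 0
def pvFirst (C : List (String × Int)) : PySem.Dict Int Int :=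
  (PySem.List.enumerate (pvKs C) 0).reverse.foldl
    (fun (d : PySem.Dict Int Int) p => d.insert (pvF C p.2) p.1) PySem.Dict.empty

-- getD of an insert fold through key/value maps: the LAST matching pair wins
theorem pv_insertFold_get? (f : String → Int) (l : List (Int × String)) :
    ∀ (d : PySem.Dict Int Int) (k : Int),
    (l.foldl (fun (d : PySem.Dict Int Int) p => d.insert (f p.2) p.1) d).get? k
      = match l.reverse.find? (fun p => f p.2 == k) with
        | some p => some p.1
        | none => d.get? k := by
  induction l with
  | nil => intro d k; simp
  | cons x t ih =>
    intro d k
    rw [List.foldl_cons, ih]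
    rw [List.reverse_cons, List.find?_append]
    cases h : t.reverse.find? (fun p => f p.2 == k) with
    | some y => simp [h]
    | none =>
      by_cases hx : f x.2 = k
      · simp [h, List.find?, hx, PySem.Dict.get?_insert]
      · have hb : (f x.2 == k) = false := by simp [hx]
        simp [h, List.find?, hb, PySem.Dict.get?_insert, Ne.symm hx]

-- the first matching pair of enumerate carries the first-occurrence index
theorem pv_find_enum (f : String → Int) (ks : List String) : ∀ (s : Int) (v : Int),
    ((PySem.List.enumerate ks s).find? (fun p => f p.2 == v)).map Prod.fst
      = if v ∈ ks.map f then some (s + (((ks.map f).idxOf v : Nat) : Int)) else none := by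
  induction ks with
  | nil => intro s v; simp [PySem.List.enumerate_nil]
  | cons x t ih =>
    intro s v
    rw [PySem.List.enumerate_cons]
    by_cases hx : f x = v
    · rw [List.find?_cons_of_pos (by simp [hx])]
      simp [hx, List.idxOf_cons_self]
    · rw [List.find?_cons_of_neg (by simp [hx])]
      rw [ih (s+1) v]
      by_cases hv : v ∈ t.map f
      · rw [if_pos hv, if_pos (by rw [List.map_cons]; exact List.mem_cons_of_mem _ hv)]
        rw [List.map_cons, List.idxOf_cons_ne _ hx]
        congr 1
        push_cast
        ring
      · rw [if_neg hv, if_neg (by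
          rw [List.map_cons, List.mem_cons]
          push_neg
          exact ⟨fun h => hx h.symm, hv⟩)]

theorem pv_first_get? (C : List (String × Int)) (v : Int) :
    (pvFirst C).get? v
      = if v ∈ (pvKs C).map (pvF C)
        then some ((((pvKs C).map (pvF C)).idxOf v : Nat) : Int) else none := by
  unfold pvFirst
  rw [pv_insertFold_get? (pvF C), List.reverse_reverse]
  have he := pv_find_enum (pvF C) (pvKs C) 0 v
  cases hfind : (PySem.List.enumerate (pvKs C) 0).find? (fun p => pvF C p.2 == v) with
  | some p =>
    rw [hfind] at he
    simp only [hfind]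
    simpa using he
  | none =>
    rw [hfind] at he
    simp only [hfind]
    simp only [Option.map_none, zero_add] at he
    rw [← he]
    simp [PySem.Dict.get?_empty]

-- dedup is strictly increasing in first-occurrence index
theorem pv_dedup_pairwise (L : List Int) :
    (PySem.List.dedup L).Pairwise (fun a b => L.idxOf a < L.idxOf b) := by
  induction L using List.reverseRecOn with
  | nil => simp [PySem.List.dedup, PySem.Set.ofList]
  | append_singleton S x ih =>
    by_cases hx : x ∈ S
    · rw [pv_dedup_append_old S x hx]
      refine ih.imp_of_mem ?_
      intro a b ha hb hab
      have haS : a ∈ S := (PySem.List.mem_dedup S a).mp ha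
      have hbS : b ∈ S := (PySem.List.mem_dedup S b).mp hb
      rwa [List.idxOf_append_of_mem haS, List.idxOf_append_of_mem hbS]
    · rw [pv_dedup_append_new S x hx]
      rw [List.pairwise_append]
      refine ⟨ih.imp_of_mem ?_, by simp, ?_⟩
      · intro a b ha hb hab
        have haS : a ∈ S := (PySem.List.mem_dedup S a).mp ha
        have hbS : b ∈ S := (PySem.List.mem_dedup S b).mp hb
        rwa [List.idxOf_append_of_mem haS, List.idxOf_append_of_mem hbS]
      · intro a ha b hb
        rw [List.mem_singleton] at hb; subst hb
        have haS : a ∈ S := (PySem.List.mem_dedup S a).mp ha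
        rw [List.idxOf_append_of_mem haS, List.idxOf_append, if_neg hx]
        have : S.idxOf a < S.length := List.idxOf_lt_length_of_mem haS
        simp only [List.idxOf_cons_self]
        omega

-- sorting the distinct labels by first-occurrence position is exactly first-appearance order
theorem pv_order (C : List (String × Int)) :
    PySem.List.sorted (pvFirst C).keys (fun v => (pvFirst C).getD v 0) false
      = PySem.List.dedup ((pvKs C).map (pvF C)) := by
  have hgetD : ∀ v ∈ (pvKs C).map (pvF C),
      (pvFirst C).getD v 0 = ((((pvKs C).map (pvF C)).idxOf v : Nat) : Int) := by
    intro v hv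
    rw [PySem.Dict.getD_eq_get?_getD, pv_first_get? C v, if_pos hv]
    rfl
  have hmemkeys : ∀ v : Int, v ∈ (pvFirst C).keys ↔ v ∈ (pvKs C).map (pvF C) := by
    intro v
    rw [← PySem.Dict.contains_iff_mem_keys, PySem.Dict.contains_eq_isSome_get?, pv_first_get? C v]
    by_cases hv : v ∈ (pvKs C).map (pvF C) <;> simp [hv]
  have hknd : (pvFirst C).keys.Nodup := by
    unfold pvFirst
    exact PySem.Dict.nodup_keys_foldl_insert_key _ (fun p : Int × String => pvF C p.2)
      (fun (_ : PySem.Dict Int Int) (p : Int × String) => p.1) _ PySem.Dict.nodup_keys_empty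
  apply PySem.List.sorted_eq_of_perm_of_pairwise_lt
  · apply (List.perm_ext_iff_of_nodup (PySem.List.nodup_dedup _) hknd).mpr
    intro v
    rw [PySem.List.mem_dedup, hmemkeys v]
  · refine (pv_dedup_pairwise _).imp_of_mem ?_
    intro a b ha hb hab
    have haL : a ∈ (pvKs C).map (pvF C) := (PySem.List.mem_dedup _ a).mp ha
    have hbL : b ∈ (pvKs C).map (pvF C) := (PySem.List.mem_dedup _ b).mp hb
    simp only [hgetD a haL, hgetD b hbL]
    exact_mod_cast hab

theorem pv_alt_char (C : List (String × Int)) :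
    relabel_communities_sorted_alt C
      = (pvKs C).map (fun n =>
          (n, ((PySem.List.dedup ((pvKs C).map (pvF C))).idxOf (pvF C n) : Int))) := by
  have h0 : relabel_communities_sorted_alt C
      = (pvKs C).map (fun n =>
          (n, ((PySem.List.enumerate
                  (PySem.List.sorted (pvFirst C).keys (fun v => (pvFirst C).getD v 0) false) 0).foldl
                (fun (d : PySem.Dict Int Int) p => d.insert p.2 p.1) PySem.Dict.empty).getD
                (pvF C n) 0)) := rfl
  rw [h0, pv_order C]
  apply List.map_congr_left
  intro n hn
  have hmem : pvF C n ∈ PySem.List.dedup ((pvKs C).map (pvF C)) :=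
    (PySem.List.mem_dedup _ _).mpr (List.mem_map_of_mem hn)
  have hnod : (PySem.List.dedup ((pvKs C).map (pvF C))).Nodup := PySem.List.nodup_dedup _
  rw [pv_enumFold_getD _ 0 _ hnod _ hmem]
  simp

theorem pv_main (C : List (String × Int)) :
    relabel_communities_sorted C = relabel_communities_sorted_alt C := by
  have hnd : (pvKs C).Nodup := by
    have hperm := PySem.List.sorted_perm (xs := PySem.Set.ofList (C.map Prod.fst)) (key := fun x => x) (rev := false)
    exact hperm.symm.nodup (PySem.Set.nodup_ofList _)
  have hA := pv_A_run (pvF C) (pvKs C) [] PySem.Dict.empty PySem.Dict.empty hnd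
    (fun m _ => PySem.Dict.contains_empty m)
    (by intro x; simp [PySem.Dict.contains_empty])
    (by intro x hx; simp [PySem.List.dedup, PySem.Set.ofList] at hx)
  have hz : PySem.List.dedup ([] : List Int) = [] := rfl
  rw [hz] at hA
  have hie : (PySem.Dict.empty : PySem.Dict String Int).items = [] := rfl
  simp only [List.length_nil, Int.natCast_zero, hie, List.nil_append] at hA
  rw [pv_alt_char C]
  exact hA

-- ===== VERDICT (by name: the statement is the Claim_ definition above) =====
theorem relabel_communities_sorted_spec : Claim_equal_relabel_communities_sorted := by
  intro C _
  unfold Spec_relabel_communities_sorted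
  exact pv_main C
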